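-- pv_equiv track=rewrite | github.com/huntakev/advent-of-code-2021 | Day 19/day_19_aoc21.py | all_transformations
-- ===== SOURCE A (Python) =====
-- def all_transformations(coords: list) -> list:
--     coords_transformed = [[] for i in range(24)]
--
--     for coord in coords:
--         x = coord[0]
--         y = coord[1]
--         z = coord[2]
--
--         coord_transformed = [[-z, y, x], [-y, -z, x], [z, -y, x], [y, z, x],
--                              [z, y, -x], [-y, z, -x], [-z, -y, -x], [y, -z, -x],
--                              [z, x, y], [-x, z, y], [-z, -x, y], [x, -z, y],
--                              [z, -x, -y], [x, z, -y], [-z, x, -y], [-x, -z, -y],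
--                              [x, y, z], [-y, x, z], [-x, -y, z], [y, -x, z],
--                              [y, x, -z], [-x, y, -z], [-y, -x, -z], [x, -y, -z]]
--
--         for index, transformation in enumerate(coord_transformed):
--             coords_transformed[index].append(transformation)
--
--     return coords_transformed
-- ===== SOURCE B (Python) =====
-- # B generates the 24 columns group-theoretically: 6 "facing" maps, each
-- # followed by three incremental quarter-turns about the new z-axis applied to
-- # the PREVIOUS column, so 18 of 24 columns are derived from already-computed
-- # columns instead of being read off a hardcoded 24-entry table.
--
-- def _quarter(p):
--     # 90-degree rotation about the third axis: (a, b, c) -> (-b, a, c)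
--     return [-p[1], p[0], p[2]]
--
--
-- _FACINGS = [
--     lambda x, y, z: [-z, y, x],
--     lambda x, y, z: [z, y, -x],
--     lambda x, y, z: [z, x, y],
--     lambda x, y, z: [z, -x, -y],
--     lambda x, y, z: [x, y, z],
--     lambda x, y, z: [y, x, -z],
-- ]
--
--
-- def all_transformations(coords: list) -> list:
--     out = []
--     for f in _FACINGS:
--         col = [f(c[0], c[1], c[2]) for c in coords]
--         for _ in range(4):
--             out.append(col)
--             col = [_quarter(p) for p in col]
--     return out
-- ===== Notes on version B (the rewrite author's own statement) =====
-- stated objective: alternative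
-- what changed: B generates the 24 columns group-theoretically: six facing maps, each followed by three incremental quarter-turns applied to the previous already-computed column, instead of A's single pass that fans each coordinate through a hardcoded 24-entry table into 24 maintained buckets.
import Mathlib
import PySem

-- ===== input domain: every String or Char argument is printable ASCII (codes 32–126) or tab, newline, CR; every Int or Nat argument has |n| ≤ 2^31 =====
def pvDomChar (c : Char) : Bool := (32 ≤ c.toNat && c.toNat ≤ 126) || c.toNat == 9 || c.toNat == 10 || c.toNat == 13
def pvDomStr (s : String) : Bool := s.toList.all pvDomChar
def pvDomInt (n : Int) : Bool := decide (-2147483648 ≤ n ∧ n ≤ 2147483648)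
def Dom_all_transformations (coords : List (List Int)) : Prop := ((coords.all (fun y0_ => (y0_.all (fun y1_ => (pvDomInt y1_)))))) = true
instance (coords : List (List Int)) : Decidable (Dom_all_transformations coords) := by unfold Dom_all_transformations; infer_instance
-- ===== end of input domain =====

-- B derives the 24 rotated columns from 6 facing maps plus incremental quarter-turns
-- of the previous column (a different algorithm), instead of A's single pass that
-- appends each coordinate's hardcoded 24 images into 24 maintained buckets.

-- ===== PORT A =====
-- the literal 24-entry list A builds per coordinate
def pvRotList (x y z : Int) : List (List Int) :=
  [[-z, y, x], [-y, -z, x], [z, -y, x], [y, z, x],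
   [z, y, -x], [-y, z, -x], [-z, -y, -x], [y, -z, -x],
   [z, x, y], [-x, z, y], [-z, -x, y], [x, -z, y],
   [z, -x, -y], [x, z, -y], [-z, x, -y], [-x, -z, -y],
   [x, y, z], [-y, x, z], [-x, -y, z], [y, -x, z],
   [y, x, -z], [-x, y, -z], [-y, -x, -z], [x, -y, -z]]

def all_transformations (coords : List (List Int)) : List (List (List Int)) :=
  -- coords_transformed = [[] for i in range(24)]
  let init : List (List (List Int)) := (List.range 24).map (fun _ => [])
  coords.foldl (fun acc coord =>
    let x := (PySem.List.pyGet? coord 0).getD 0   -- coord[0]; IndexError excluded by Pre_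
    let y := (PySem.List.pyGet? coord 1).getD 0
    let z := (PySem.List.pyGet? coord 2).getD 0
    -- for index, t in enumerate(coord_transformed): acc[index].append(t)
    List.zipWith (fun bucket t => bucket ++ [t]) acc (pvRotList x y z)) init

-- ===== PORT B =====
-- _quarter(p): 90-degree rotation about the third axis; p is a 3-list B built itself
def pvQuarter (p : List Int) : List Int :=
  [-((PySem.List.pyGet? p 1).getD 0), (PySem.List.pyGet? p 0).getD 0,
   (PySem.List.pyGet? p 2).getD 0]

-- _FACINGS: the six facing maps
def pvFacings : List (Int → Int → Int → List Int) :=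
  [fun x y z => [-z, y, x],
   fun x y z => [z, y, -x],
   fun x y z => [z, x, y],
   fun x y z => [z, -x, -y],
   fun x y z => [x, y, z],
   fun x y z => [y, x, -z]]

def all_transformations_alt (coords : List (List Int)) : List (List (List Int)) :=
  pvFacings.foldl (fun out f =>
    let col := coords.map (fun c =>
      f ((PySem.List.pyGet? c 0).getD 0) ((PySem.List.pyGet? c 1).getD 0)
        ((PySem.List.pyGet? c 2).getD 0))
    ((List.range 4).foldl (fun (st : List (List (List Int)) × List (List Int)) _ =>
      (st.1 ++ [st.2], st.2.map pvQuarter)) (out, col)).1) []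

-- ===== PRECONDITION & SPEC =====
-- excludes exactly the inputs where coord[0]/[1]/[2] raises IndexError in A (and in B)
def Pre_all_transformations (coords : List (List Int)) : Prop :=
  ∀ c ∈ coords, 3 ≤ c.length
instance (coords : List (List Int)) : Decidable (Pre_all_transformations coords) := by
  unfold Pre_all_transformations; infer_instance

def pvWitness_all_transformations : List (List Int) := [[1, 2, 3], [-4, 0, 7]]

def Spec_all_transformations (coords : List (List Int)) (out : List (List (List Int))) : Prop := out = all_transformations_alt coords
instance (coords : List (List Int)) (out : List (List (List Int))) : Decidable (Spec_all_transformations coords out) := by unfold Spec_all_transformations; infer_instance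

-- ===== CLAIM (what is proved, stated in full; the proofs are below) =====
def Claim_equal_all_transformations : Prop := ∀ (coords : List (List Int)), Dom_all_transformations coords → Pre_all_transformations coords → Spec_all_transformations coords (all_transformations coords)

-- ===== LEMMAS AND PROOFS =====

-- the 24 rotations as functions, in A's order (proof-only common target)
def pvRotFns : List (Int → Int → Int → List Int) :=
  [fun x y z => [-z, y, x], fun x y z => [-y, -z, x], fun x y z => [z, -y, x], fun x y z => [y, z, x],
   fun x y z => [z, y, -x], fun x y z => [-y, z, -x], fun x y z => [-z, -y, -x], fun x y z => [y, -z, -x],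
   fun x y z => [z, x, y], fun x y z => [-x, z, y], fun x y z => [-z, -x, y], fun x y z => [x, -z, y],
   fun x y z => [z, -x, -y], fun x y z => [x, z, -y], fun x y z => [-z, x, -y], fun x y z => [-x, -z, -y],
   fun x y z => [x, y, z], fun x y z => [-y, x, z], fun x y z => [-x, -y, z], fun x y z => [y, -x, z],
   fun x y z => [y, x, -z], fun x y z => [-x, y, -z], fun x y z => [-y, -x, -z], fun x y z => [x, -y, -z]]

theorem pvRotList_eq_map (x y z : Int) :
    pvRotList x y z = pvRotFns.map (fun r => r x y z) := rfl

theorem pvQuarter_lit (a b c : Int) : pvQuarter [a, b, c] = [-b, a, c] := rfl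

-- zipWith of two maps over the SAME list collapses to one map
theorem pvZipWith_map_same {α β γ δ : Type} (f : β → γ → δ) (g : α → β) (g' : α → γ) :
    ∀ l : List α, List.zipWith f (l.map g) (l.map g') = l.map (fun x => f (g x) (g' x))
  | [] => rfl
  | x :: xs => by simp [pvZipWith_map_same f g g' xs]

-- transposition lemma: A's bucket-appending fold over coords, started from per-rotation
-- prefixes, equals the per-rotation map over coords appended to those prefixes
theorem pvFold_transpose (coords : List (List Int))
    (h : (Int → Int → Int → List Int) → List (List Int)) :
    coords.foldl (fun acc c =>
        List.zipWith (fun bucket t => bucket ++ [t]) acc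
          (pvRotFns.map (fun r =>
            r ((PySem.List.pyGet? c 0).getD 0) ((PySem.List.pyGet? c 1).getD 0)
              ((PySem.List.pyGet? c 2).getD 0))))
      (pvRotFns.map h)
      = pvRotFns.map (fun r => h r ++ coords.map (fun c =>
          r ((PySem.List.pyGet? c 0).getD 0) ((PySem.List.pyGet? c 1).getD 0)
            ((PySem.List.pyGet? c 2).getD 0))) := by
  induction coords generalizing h with
  | nil => simp
  | cons c cs ih =>
    simp only [List.foldl_cons, pvZipWith_map_same]
    rw [ih (fun r => h r ++ [r ((PySem.List.pyGet? c 0).getD 0)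
      ((PySem.List.pyGet? c 1).getD 0) ((PySem.List.pyGet? c 2).getD 0)])]
    simp

-- A equals the common per-rotation-column form
theorem pvA_cols (coords : List (List Int)) :
    all_transformations coords
      = pvRotFns.map (fun r => coords.map (fun c =>
          r ((PySem.List.pyGet? c 0).getD 0) ((PySem.List.pyGet? c 1).getD 0)
            ((PySem.List.pyGet? c 2).getD 0))) := by
  unfold all_transformations
  have hinit : (List.range 24).map (fun _ => ([] : List (List Int)))
      = pvRotFns.map (fun _ => ([] : List (List Int))) := by decide
  simp only [pvRotList_eq_map, hinit]
  rw [pvFold_transpose coords (fun _ => [])]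
  simp

-- B equals the same form: unfold the 6-facing fold and the 4-step quarter-turn folds
theorem pvB_cols (coords : List (List Int)) :
    all_transformations_alt coords
      = pvRotFns.map (fun r => coords.map (fun c =>
          r ((PySem.List.pyGet? c 0).getD 0) ((PySem.List.pyGet? c 1).getD 0)
            ((PySem.List.pyGet? c 2).getD 0))) := by
  have h4 : List.range 4 = [0, 1, 2, 3] := by decide
  simp only [all_transformations_alt, pvFacings, pvRotFns, h4, List.foldl_cons,
    List.foldl_nil, List.map_cons, List.map_nil, List.map_map]
  simp [Function.comp_def, pvQuarter_lit]

-- ===== VERDICT (by name: the statement is the Claim_ definition above) =====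
theorem all_transformations_spec : Claim_equal_all_transformations := by
  intro coords _ _
  unfold Spec_all_transformations
  rw [pvA_cols, pvB_cols]
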